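-- pv_equiv track=rewrite | github.com/apaap/sssss | scripts/sss.py | giveRLE
-- ===== SOURCE A (Python) =====
-- def chunks(l, n):
--     for i in range(0, len(l), n):
--         yield l[i:i+n]
--
-- def giveRLE(clist):
--     # clist_chunks = list (chunks (g.evolve(clist,0), 2))
--     clist_chunks = list(chunks(clist, 2))
--     clist_chunks.sort(key=lambda l:(l[1], l[0]))
--     mcc = min(clist_chunks)
--     rl_list = [[x[0]-mcc[0],x[1]-mcc[1]] for x in clist_chunks]
--     rle_res = ""
--     rle_len = 1
--     rl_y = rl_list[0][1] - 1
--     rl_x = 0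
--     for rl_i in rl_list:
--         if rl_i[1] == rl_y:
--             if rl_i[0] == rl_x + 1:
--                 rle_len += 1
--             else:
--                 if rle_len == 1: rle_strA = ""
--                 else: rle_strA = str (rle_len)
--                 if rl_i[0] - rl_x - 1 == 1: rle_strB = ""
--                 else: rle_strB = str (rl_i[0] - rl_x - 1)
--
--                 rle_res = rle_res + rle_strA + "o" + rle_strB + "b"
--                 rle_len = 1
--         else:
--             if rle_len == 1: rle_strA = ""
--             else: rle_strA = str (rle_len)
--             if rl_i[1] - rl_y == 1: rle_strB = ""
--             else: rle_strB = str (rl_i[1] - rl_y)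
--             if rl_i[0] == 1: rle_strC = "b"
--             elif rl_i[0] == 0: rle_strC = ""
--             else: rle_strC = str (rl_i[0]) + "b"
--
--             rle_res = rle_res + rle_strA + "o" + rle_strB + "$" + rle_strC
--             rle_len = 1
--
--         rl_x = rl_i[0]
--         rl_y = rl_i[1]
--
--     if rle_len == 1: rle_strA = ""
--     else: rle_strA = str (rle_len)
--     rle_res = rle_res[2:] + rle_strA + "o"
--
--     return rle_res+"!"
-- ===== SOURCE B (Python) =====
-- def giveRLE(clist):
--     pts = sorted(((clist[i], clist[i + 1]) for i in range(0, len(clist), 2)),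
--                  key=lambda p: (p[1], p[0]))
--     ox, oy = min(pts)
--     pts = [(x - ox, y - oy) for (x, y) in pts]
--
--     def num(n):
--         return "" if n == 1 else str(n)
--
--     def lead(x):
--         if x == 0:
--             return ""
--         if x == 1:
--             return "b"
--         return str(x) + "b"
--
--     n = len(pts)
--     out = [lead(pts[0][0])]
--     i = 0
--     while i < n:
--         x, y = pts[i]
--         j = i + 1
--         while j < n and pts[j] == (x + (j - i), y):
--             j += 1
--         out.append(num(j - i) + "o")
--         if j < n:
--             nx, ny = pts[j]
--             if ny == y:
--                 out.append(num(nx - (x + (j - i) - 1) - 1) + "b")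
--             else:
--                 out.append(num(ny - y) + "$" + lead(nx))
--         i = j
--     out.append("!")
--     return "".join(out)
-- ===== Notes on version B (the rewrite author's own statement) =====
-- stated objective: alternative
-- what changed: Replaces A's sentinel-initialized single pass with mutable run-length/prev-point state and the rle_res[2:] cleanup of the dummy first row by a run-grouping scan: an inner span finds each maximal live run, tokens (run, gap, row-break, leading blanks) are emitted per run into a list and joined once.
import Mathlib
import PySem

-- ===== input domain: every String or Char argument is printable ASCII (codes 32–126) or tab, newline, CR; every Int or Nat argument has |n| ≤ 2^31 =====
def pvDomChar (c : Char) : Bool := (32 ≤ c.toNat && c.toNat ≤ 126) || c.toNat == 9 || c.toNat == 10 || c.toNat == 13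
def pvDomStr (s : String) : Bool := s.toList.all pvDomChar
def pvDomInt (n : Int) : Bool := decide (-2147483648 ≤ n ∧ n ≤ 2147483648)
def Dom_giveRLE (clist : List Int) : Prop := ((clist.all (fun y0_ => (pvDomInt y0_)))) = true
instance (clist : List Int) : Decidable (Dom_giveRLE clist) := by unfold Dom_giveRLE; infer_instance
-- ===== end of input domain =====

-- B replaces A's sentinel-state single pass (and its rle_res[2:] fixup) by a run-grouping scan
-- that emits one token per run/gap/row-break into a list joined once; same return value (no
-- argument is mutated observably).

-- ===== PORT A =====
-- the loop body of A; state = (rle_res, rle_len, rl_x, rl_y)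
def astep (st : String × Int × Int × Int) (p : Int × Int) : String × Int × Int × Int :=
  match st with
  | (res, len, x, y) =>
    if p.2 = y then
      if p.1 = x + 1 then (res, len + 1, p.1, p.2)
      else
        let sA := if len = 1 then "" else PySem.Int.toStr len
        let sB := if p.1 - x - 1 = 1 then "" else PySem.Int.toStr (p.1 - x - 1)
        (res ++ sA ++ "o" ++ sB ++ "b", 1, p.1, p.2)
    else
      let sA := if len = 1 then "" else PySem.Int.toStr len
      let sB := if p.2 - y = 1 then "" else PySem.Int.toStr (p.2 - y)
      let sC := if p.1 = 1 then "b" else if p.1 = 0 then "" else PySem.Int.toStr p.1 ++ "b"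
      (res ++ sA ++ "o" ++ sB ++ "$" ++ sC, 1, p.1, p.2)

def giveRLE (clist : List Int) : String :=
  -- chunks(clist, 2) modeled as coordinate pairs (exact under Pre_: even length, so every chunk
  -- is a full pair; on odd lengths Python raises IndexError in the sort key, excluded by Pre_)
  let chunksL := (PySem.List.pyRange 0 (clist.length : Int) 2).map
    (fun i => (PySem.List.pyGetD clist i 0, PySem.List.pyGetD clist (i + 1) 0))
  let sortedC := PySem.List.sorted2 chunksL (fun p => p.2) (fun p => p.1)
  match PySem.List.min2? sortedC (fun p => p.1) (fun p => p.2) with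
  | none => ""  -- Python raises ValueError (empty input); excluded by Pre_
  | some mcc =>
    let rlList := sortedC.map (fun p => (p.1 - mcc.1, p.2 - mcc.2))
    let rlY := (PySem.List.pyGetD rlList 0 (0, 0)).2 - 1
    let st := rlList.foldl astep ("", 1, 0, rlY)
    let sA := if st.2.1 = 1 then "" else PySem.Int.toStr st.2.1
    PySem.Str.slice st.1 (some 2) none ++ sA ++ "o" ++ "!"

-- ===== PORT B =====
def bnum (n : Int) : String := if n = 1 then "" else PySem.Int.toStr n

def blead (x : Int) : String :=
  if x = 0 then "" else if x = 1 then "b" else PySem.Int.toStr x ++ "b"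

-- inner while of B: extend the live run started at (x, y); k cells scanned so far
def bspan (x y k : Int) : List (Int × Int) → Int × List (Int × Int)
  | [] => (k, [])
  | q :: rest => if q = (x + k, y) then bspan x y (k + 1) rest else (k, q :: rest)

theorem bspan_len (x y k : Int) (l : List (Int × Int)) : (bspan x y k l).2.length ≤ l.length := by
  induction l generalizing k with
  | nil => simp [bspan]
  | cons q rest ih =>
    simp only [bspan]
    split
    · exact le_trans (ih (k + 1)) (Nat.le_succ _)
    · simp

-- outer while of B: one token string per run (the run token plus its following separator)
def bloop : List (Int × Int) → List String
  | [] => []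
  | (x, y) :: rest =>
    match hs : bspan x y 1 rest with
    | (k, []) => [bnum k ++ "o"]
    | (k, (nx, ny) :: rest2) =>
      (bnum k ++ "o" ++ (if ny = y then bnum (nx - (x + k - 1) - 1) ++ "b"
          else bnum (ny - y) ++ "$" ++ blead nx)) :: bloop ((nx, ny) :: rest2)
  termination_by l => l.length
  decreasing_by
    have h := bspan_len x y 1 rest
    rw [hs] at h
    simpa using Nat.lt_succ_of_le h

def giveRLE_alt (clist : List Int) : String :=
  let pts0 := (PySem.List.pyRange 0 (clist.length : Int) 2).map
    (fun i => (PySem.List.pyGetD clist i 0, PySem.List.pyGetD clist (i + 1) 0))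
  let ptsS := PySem.List.sorted2 pts0 (fun p => p.2) (fun p => p.1)
  match PySem.List.min2? ptsS (fun p => p.1) (fun p => p.2) with
  | none => ""  -- Python raises ValueError (empty input); excluded by Pre_
  | some o =>
    match ptsS.map (fun p => (p.1 - o.1, p.2 - o.2)) with
    | [] => ""  -- unreachable: min2? succeeded, so the list is nonempty
    | (x0, y0) :: rest => blead x0 ++ String.join (bloop ((x0, y0) :: rest)) ++ "!"

-- ===== PRECONDITION & SPEC =====
-- Pre_ excludes exactly the inputs where A raises: the empty list (ValueError from min) and
-- odd-length lists (IndexError from l[1] in the sort key on the final singleton chunk).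
def Pre_giveRLE (clist : List Int) : Prop := clist ≠ [] ∧ clist.length % 2 = 0
instance (clist : List Int) : Decidable (Pre_giveRLE clist) := by unfold Pre_giveRLE; infer_instance

def pvWitness_giveRLE : List Int := [0, 0, 2, 0, 3, 0, 1, 2]

def Spec_giveRLE (clist : List Int) (out : String) : Prop := out = giveRLE_alt clist
instance (clist : List Int) (out : String) : Decidable (Spec_giveRLE clist out) := by unfold Spec_giveRLE; infer_instance

-- ===== CLAIM (what is proved, stated in full; the proofs are below) =====
def Claim_equal_giveRLE : Prop := ∀ (clist : List Int), Dom_giveRLE clist → Pre_giveRLE clist → Spec_giveRLE clist (giveRLE clist)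

-- ===== LEMMAS AND PROOFS =====

-- proof-side characterisation of the token stream emitted after a partial run of length k whose
-- last scanned cell is (px, py)
def runsStr (px py k : Int) : List (Int × Int) → String
  | [] => bnum k ++ "o"
  | q :: rest =>
    if q.2 = py then
      if q.1 = px + 1 then runsStr q.1 py (k + 1) rest
      else bnum k ++ "o" ++ bnum (q.1 - px - 1) ++ "b" ++ runsStr q.1 q.2 1 rest
    else bnum k ++ "o" ++ bnum (q.2 - py) ++ "$" ++ blead q.1 ++ runsStr q.1 q.2 1 rest

theorem sC_eq_blead (x : Int) :
    (if x = 1 then "b" else if x = 0 then "" else PySem.Int.toStr x ++ "b") = blead x := by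
  unfold blead
  by_cases h0 : x = 0 <;> by_cases h1 : x = 1 <;> simp [h0, h1]

-- A's fold appends, once its final flush token is added, exactly the token stream runsStr
theorem foldA_eq_runsStr (rest : List (Int × Int)) :
    ∀ (res : String) (len px py : Int),
    ∃ t : List Char,
      (rest.foldl astep (res, len, px, py)).1.toList = res.toList ++ t ∧
      t ++ ((if (rest.foldl astep (res, len, px, py)).2.1 = 1 then ""
             else PySem.Int.toStr (rest.foldl astep (res, len, px, py)).2.1) ++ "o").toList
        = (runsStr px py len rest).toList := by
  induction rest with
  | nil =>
    intro res len px py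
    exact ⟨[], by simp, by simp [runsStr, bnum]⟩
  | cons p rest ih =>
    intro res len px py
    simp only [List.foldl_cons]
    by_cases hy : p.2 = py
    · by_cases hx : p.1 = px + 1
      · -- run continues
        have hstep : astep (res, len, px, py) p = (res, len + 1, p.1, p.2) := by
          simp [astep, hy, hx]
        obtain ⟨t, h1, h2⟩ := ih res (len + 1) p.1 p.2
        rw [hstep]
        refine ⟨t, h1, ?_⟩
        rw [h2, show runsStr px py len (p :: rest) = runsStr p.1 p.2 (len + 1) rest by
          simp [runsStr, hy, hx]]
      · -- gap within the row
        have hstep : astep (res, len, px, py) p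
            = (res ++ (if len = 1 then "" else PySem.Int.toStr len) ++ "o"
                ++ (if p.1 - px - 1 = 1 then "" else PySem.Int.toStr (p.1 - px - 1)) ++ "b",
               1, p.1, p.2) := by
          simp [astep, hy, hx]
        obtain ⟨t, h1, h2⟩ := ih (res ++ (if len = 1 then "" else PySem.Int.toStr len) ++ "o"
            ++ (if p.1 - px - 1 = 1 then "" else PySem.Int.toStr (p.1 - px - 1)) ++ "b") 1 p.1 p.2
        rw [hstep]
        refine ⟨((if len = 1 then "" else PySem.Int.toStr len) ++ "o"
            ++ (if p.1 - px - 1 = 1 then "" else PySem.Int.toStr (p.1 - px - 1)) ++ "b").toList ++ t,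
            ?_, ?_⟩
        · rw [h1]; simp
        · rw [List.append_assoc, h2, show runsStr px py len (p :: rest)
              = bnum len ++ "o" ++ bnum (p.1 - px - 1) ++ "b" ++ runsStr p.1 p.2 1 rest by
            simp [runsStr, hy, hx]]
          simp [bnum]
    · -- row break
      have hstep : astep (res, len, px, py) p
          = (res ++ (if len = 1 then "" else PySem.Int.toStr len) ++ "o"
              ++ (if p.2 - py = 1 then "" else PySem.Int.toStr (p.2 - py)) ++ "$"
              ++ (if p.1 = 1 then "b" else if p.1 = 0 then "" else PySem.Int.toStr p.1 ++ "b"),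
             1, p.1, p.2) := by
        simp [astep, hy]
      obtain ⟨t, h1, h2⟩ := ih (res ++ (if len = 1 then "" else PySem.Int.toStr len) ++ "o"
          ++ (if p.2 - py = 1 then "" else PySem.Int.toStr (p.2 - py)) ++ "$"
          ++ (if p.1 = 1 then "b" else if p.1 = 0 then "" else PySem.Int.toStr p.1 ++ "b")) 1 p.1 p.2
      rw [hstep]
      refine ⟨((if len = 1 then "" else PySem.Int.toStr len) ++ "o"
          ++ (if p.2 - py = 1 then "" else PySem.Int.toStr (p.2 - py)) ++ "$"
          ++ (if p.1 = 1 then "b" else if p.1 = 0 then "" else PySem.Int.toStr p.1 ++ "b")).toList ++ t,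
          ?_, ?_⟩
      · rw [h1]; simp
      · rw [List.append_assoc, h2, show runsStr px py len (p :: rest)
            = bnum len ++ "o" ++ bnum (p.2 - py) ++ "$" ++ blead p.1 ++ runsStr p.1 p.2 1 rest by
          simp [runsStr, hy]]
        simp [bnum, ← sC_eq_blead]

-- generalised body of B's outer loop, starting mid-run (run start (x, y), k cells scanned)
def bgo (x y k : Int) (rest : List (Int × Int)) : List String :=
  match bspan x y k rest with
  | (k', []) => [bnum k' ++ "o"]
  | (k', (nx, ny) :: rest2) =>
    (bnum k' ++ "o" ++ (if ny = y then bnum (nx - (x + k' - 1) - 1) ++ "b"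
        else bnum (ny - y) ++ "$" ++ blead nx)) :: bloop ((nx, ny) :: rest2)

theorem join_cons_toList (s : String) (l : List String) :
    (String.join (s :: l)).toList = s.toList ++ (String.join l).toList := by simp

theorem bloop_cons_eq_bgo (x y : Int) (rest : List (Int × Int)) :
    bloop ((x, y) :: rest) = bgo x y 1 rest := by
  cases h : bspan x y 1 rest with
  | mk k l => rw [bloop, bgo, h]; cases l <;> rfl

theorem join_bgo_eq_runsStr (rest : List (Int × Int)) :
    ∀ (x y k : Int),
    (String.join (bgo x y k rest)).toList = (runsStr (x + k - 1) y k rest).toList := by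
  induction rest with
  | nil => intro x y k; simp [bgo, bspan, runsStr]
  | cons q rest ih =>
    intro x y k
    obtain ⟨qa, qb⟩ := q
    by_cases hq : (qa, qb) = (x + k, y)
    · obtain ⟨hqa, hqb⟩ : qa = x + k ∧ qb = y := by
        simpa [Prod.mk.injEq] using hq
      have hb : bgo x y k ((qa, qb) :: rest) = bgo x y (k + 1) rest := by
        rw [bgo, bgo]
        simp [bspan, hq]
      rw [hb, ih x y (k + 1)]
      have hr : runsStr (x + k - 1) y k ((qa, qb) :: rest)
          = runsStr (x + (k + 1) - 1) y (k + 1) rest := by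
        rw [runsStr]
        simp only [hqa, hqb, if_pos, if_pos (show x + k = x + k - 1 + 1 by omega)]
        have h1 : x + k = x + (k + 1) - 1 := by omega
        rw [h1]
      rw [hr]
    · have hb : bspan x y k ((qa, qb) :: rest) = (k, (qa, qb) :: rest) := by
        simp [bspan, hq]
      have hgo : bgo x y k ((qa, qb) :: rest)
          = (bnum k ++ "o" ++ (if qb = y then bnum (qa - (x + k - 1) - 1) ++ "b"
              else bnum (qb - y) ++ "$" ++ blead qa)) :: bloop ((qa, qb) :: rest) := by
        rw [bgo, hb]
      have hrec : (String.join (bloop ((qa, qb) :: rest))).toList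
          = (runsStr qa qb 1 rest).toList := by
        rw [bloop_cons_eq_bgo]
        have := ih qa qb 1
        rwa [show qa + 1 - 1 = qa by omega] at this
      by_cases hy : qb = y
      · have hqa : qa ≠ x + k := fun h => hq (by rw [h, hy])
        have hr : runsStr (x + k - 1) y k ((qa, qb) :: rest)
            = bnum k ++ "o" ++ bnum (qa - (x + k - 1) - 1) ++ "b" ++ runsStr qa qb 1 rest := by
          rw [runsStr]
          simp only [hy, if_pos, if_neg (show ¬ qa = x + k - 1 + 1 by omega)]
        rw [hgo, join_cons_toList, hrec, hr]
        simp [hy]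
      · have hr : runsStr (x + k - 1) y k ((qa, qb) :: rest)
            = bnum k ++ "o" ++ bnum (qb - y) ++ "$" ++ blead qa ++ runsStr qa qb 1 rest := by
          rw [runsStr]
          simp only [hy, if_false]
        rw [hgo, join_cons_toList, hrec, hr]
        simp [hy]

-- min over a nonempty list is some
theorem min2?_cons_some (a : Int × Int) (t : List (Int × Int)) :
    ∃ m, PySem.List.min2? (a :: t) (fun p => p.1) (fun p => p.2) = some m := by
  simp only [PySem.List.min2?]
  induction t generalizing a with
  | nil => exact ⟨a, rfl⟩
  | cons b t ih =>
    simp only [List.foldl_cons]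
    by_cases h : b.1 < a.1 ∨ b.1 ≤ a.1 ∧ b.2 < a.2
    · simpa [h] using ih b
    · simpa [h] using ih a

theorem slice2_toList (s : String) : (PySem.Str.slice s (some 2) none).toList = s.toList.drop 2 := by
  simp [PySem.Str.slice]
  rw [show ((2:Int)) = ((2:Nat):Int) by norm_num, PySem.List.slice_from_natCast]

-- ===== VERDICT (by name: the statement is the Claim_ definition above) =====
theorem giveRLE_spec : Claim_equal_giveRLE := by
  intro clist _ hpre
  unfold Spec_giveRLE
  simp only [giveRLE, giveRLE_alt]
  cases hs : PySem.List.sorted2 ((PySem.List.pyRange 0 (clist.length : Int) 2).map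
      (fun i => (PySem.List.pyGetD clist i 0, PySem.List.pyGetD clist (i + 1) 0)))
      (fun p => p.2) (fun p => p.1) with
  | nil => rfl
  | cons p tail =>
    obtain ⟨mcc, hmin⟩ := min2?_cons_some p tail
    rw [hmin]
    simp only [List.map_cons, PySem.List.pyGetD_zero_cons, List.foldl_cons]
    have hstep : astep ("", 1, 0, (p.2 - mcc.2) - 1) (p.1 - mcc.1, p.2 - mcc.2)
        = ("" ++ "" ++ "o" ++ "" ++ "$"
            ++ (if p.1 - mcc.1 = 1 then "b" else if p.1 - mcc.1 = 0 then ""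
                else PySem.Int.toStr (p.1 - mcc.1) ++ "b"),
           1, p.1 - mcc.1, p.2 - mcc.2) := by
      simp only [astep]
      rw [if_neg (by omega)]
      simp [show p.2 - mcc.2 - (p.2 - mcc.2 - 1) = 1 by omega]
    rw [hstep]
    obtain ⟨t, h1, h2⟩ := foldA_eq_runsStr (tail.map (fun q => (q.1 - mcc.1, q.2 - mcc.2)))
      ("" ++ "" ++ "o" ++ "" ++ "$"
        ++ (if p.1 - mcc.1 = 1 then "b" else if p.1 - mcc.1 = 0 then ""
            else PySem.Int.toStr (p.1 - mcc.1) ++ "b"))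
      1 (p.1 - mcc.1) (p.2 - mcc.2)
    refine String.toList_inj.mp ?_
    rw [bloop_cons_eq_bgo]
    have hB := join_bgo_eq_runsStr (tail.map (fun q => (q.1 - mcc.1, q.2 - mcc.2)))
      (p.1 - mcc.1) (p.2 - mcc.2) 1
    rw [show p.1 - mcc.1 + 1 - 1 = p.1 - mcc.1 by omega] at hB
    simp only [String.toList_append, slice2_toList, h1]
    rw [hB]
    rw [← sC_eq_blead]
    simp only [String.toList_append] at h2 ⊢
    simp only [List.append_assoc]
    rw [← h2]
    simp
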